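-- pv_equiv track=rewrite | github.com/kjnh10/pcw | work/atcoder/abc/abc058/D/answers/210628_peroon.py | sum_len
-- ===== SOURCE A (Python) =====
-- def sum_len(A):
--     all_sum = 0
--     previous_sum = 0
--     for i in range(1, len(A)):
--         now_sum = previous_sum + i * (A[i] - A[i-1])
--         all_sum += now_sum
--         previous_sum = now_sum
--     return all_sum
-- ===== SOURCE B (Python) =====
-- def sum_len(A):
--     n = len(A)
--     return sum((2 * i - n + 1) * a for i, a in enumerate(A))
-- ===== Notes on version B (the rewrite author's own statement) =====
-- stated objective: alternative
-- what changed: B replaces A's stateful running telescoped accumulator with a stateless closed form: each element contributes (2*i - n + 1)*A[i], summed in one comprehension over enumerate(A).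
import Mathlib
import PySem

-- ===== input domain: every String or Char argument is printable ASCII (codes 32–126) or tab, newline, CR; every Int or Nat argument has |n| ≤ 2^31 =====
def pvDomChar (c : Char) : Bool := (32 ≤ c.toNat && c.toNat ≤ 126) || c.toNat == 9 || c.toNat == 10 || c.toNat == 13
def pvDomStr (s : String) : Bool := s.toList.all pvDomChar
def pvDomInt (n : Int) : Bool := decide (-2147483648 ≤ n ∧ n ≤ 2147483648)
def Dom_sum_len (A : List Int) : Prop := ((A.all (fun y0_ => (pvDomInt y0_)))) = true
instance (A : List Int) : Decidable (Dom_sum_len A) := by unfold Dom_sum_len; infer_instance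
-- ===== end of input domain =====

-- B replaces A's stateful running telescoped accumulator with the stateless closed
-- form Σ_i (2*i - n + 1) * A[i] (one comprehension over enumerate); same O(n) cost.

-- ===== PORT A =====
-- one loop step of A: state = (all_sum, previous_sum)
def stepA (A : List Int) (s : Int × Int) (i : Int) : Int × Int :=
  let now := s.2 + i * (PySem.List.pyGetD A i 0 - PySem.List.pyGetD A (i - 1) 0)
  (s.1 + now, now)

def sum_len (A : List Int) : Int :=
  ((PySem.List.pyRange 1 (A.length : Int) 1).foldl (stepA A) (0, 0)).1

-- ===== PORT B =====
-- sum((2*i - n + 1) * a for i, a in enumerate(A)) : a map-then-sum, no loop state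
def sum_len_alt (A : List Int) : Int :=
  ((PySem.List.enumerate A 0).map
    (fun p => (2 * p.1 - (A.length : Int) + 1) * p.2)).sum

-- ===== PRECONDITION & SPEC =====
def Spec_sum_len (A : List Int) (out : Int) : Prop := out = sum_len_alt A
instance (A : List Int) (out : Int) : Decidable (Spec_sum_len A out) := by unfold Spec_sum_len; infer_instance

-- ===== CLAIM (what is proved, stated in full; the proofs are below) =====
def Claim_equal_sum_len : Prop := ∀ (A : List Int), Dom_sum_len A → Spec_sum_len A (sum_len A)

-- ===== LEMMAS AND PROOFS =====

-- the closed-form weighted sum over the first k indices, with weight 2*i - k + 1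
def pvG (A : List Int) (k : Nat) : Int :=
  ∑ i ∈ Finset.range k, (2 * (i : Int) - (k : Int) + 1) * A.getD i 0

-- plain prefix sum of the first k elements
def pvP (A : List Int) (k : Nat) : Int :=
  ∑ i ∈ Finset.range k, A.getD i 0

-- loop invariant for A's fold over range(1, k): the accumulated total is the
-- closed form pvG, and previous_sum telescopes to (k-1)*A[k-1] - prefix(k-1)
theorem pv_inv (A : List Int) :
    ∀ (k : Nat), 1 ≤ k → k ≤ A.length →
      ((PySem.List.pyRange 1 (k : Int) 1).foldl (stepA A) (0, 0)).1 = pvG A k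
      ∧ ((PySem.List.pyRange 1 (k : Int) 1).foldl (stepA A) (0, 0)).2
        = ((k : Int) - 1) * A.getD (k - 1) 0 - pvP A (k - 1) := by
  intro k hk
  induction k, hk using Nat.le_induction with
  | base =>
    intro _
    simp [PySem.List.pyRange_one_eq_nil, pvG, pvP]
  | succ k hk ih =>
    intro hle
    have hklen : k < A.length := by omega
    obtain ⟨h1, h2⟩ := ih (by omega)
    have hsplit : PySem.List.pyRange 1 ((k : Int) + 1) 1
        = PySem.List.pyRange 1 (k : Int) 1 ++ [(k : Int)] := by
      exact PySem.List.pyRange_one_succ_right (by exact_mod_cast hk)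
    have hcast : ((k + 1 : Nat) : Int) = (k : Int) + 1 := by push_cast; ring
    rw [hcast, hsplit]
    simp only [List.foldl_append, List.foldl_cons, List.foldl_nil]
    -- in-range accesses: pyGetD = getD
    have hk1 : ((k : Int) - 1) = ((k - 1 : Nat) : Int) := by omega
    have hget_k : PySem.List.pyGetD A (k : Int) 0 = A.getD k 0 := by
      rw [PySem.List.pyGetD_natCast]
    have hget_k1 : PySem.List.pyGetD A ((k : Int) - 1) 0 = A.getD (k - 1) 0 := by
      rw [hk1, PySem.List.pyGetD_natCast]
    have hP : pvP A k = pvP A (k - 1) + A.getD (k - 1) 0 := by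
      conv_lhs => rw [show k = (k - 1) + 1 by omega]
      unfold pvP
      rw [Finset.sum_range_succ]
    constructor
    · simp only [stepA]
      rw [h1, h2, hget_k, hget_k1]
      have hGsucc : pvG A (k + 1) = (pvG A k - pvP A k) + (k : Int) * A.getD k 0 := by
        unfold pvG pvP
        rw [Finset.sum_range_succ, ← Finset.sum_sub_distrib]
        push_cast
        congr 1
        · apply Finset.sum_congr rfl
          intro i _
          ring
        · ring
      rw [hGsucc, hP]
      ring
    · simp only [stepA]
      have hsub : (k + 1 - 1 : Nat) = k := by omega
      rw [h2, hget_k, hget_k1, hsub, hP]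
      ring

-- sum of a map over List.range as a Finset.range sum
theorem pv_sum_map_range (f : Nat → Int) (n : Nat) :
    ((List.range n).map f).sum = ∑ i ∈ Finset.range n, f i := by
  induction n with
  | zero => simp
  | succ n ih =>
    rw [List.range_succ, List.map_append, List.sum_append, Finset.sum_range_succ, ih]
    simp

-- B's map-sum equals the closed form pvG at k = A.length
theorem pv_alt_eq (A : List Int) : sum_len_alt A = pvG A A.length := by
  unfold sum_len_alt
  rw [PySem.List.enumerate_eq_map_pyRange (d := 0), List.map_map,
      PySem.List.pyRange_one, List.map_map]
  have hlen : (PySem.List.len A - 0).toNat = A.length := by simp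
  rw [hlen, pv_sum_map_range]
  unfold pvG
  apply Finset.sum_congr rfl
  intro i hi
  simp [Function.comp, PySem.List.pyGetD_natCast]

-- ===== VERDICT (by name: the statement is the Claim_ definition above) =====
theorem sum_len_spec : Claim_equal_sum_len := by
  intro A _
  unfold Spec_sum_len sum_len
  rw [pv_alt_eq]
  by_cases h : 1 ≤ A.length
  · exact (pv_inv A A.length h le_rfl).1
  · have h0 : A.length = 0 := by omega
    have : (A.length : Int) ≤ 1 := by omega
    rw [PySem.List.pyRange_one_eq_nil this]
    simp [pvG, h0]
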